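-- pv_equiv track=rewrite | github.com/Sirozha1337/faster-auto-subtitle | faster_auto_subtitle/translation/easynmt.py | _reconstruct_document
-- ===== SOURCE A (Python) =====
-- def _reconstruct_document(doc, org_sent, translated_sent):
--     """
--     This method reconstructs the translated document and
--     keeps white space in the beginning / at the end of sentences.
--     """
--     sent_idx = 0
--     char_idx = 0
--     translated_doc = ""
--     while char_idx < len(doc):
--         if sent_idx < len(org_sent) and doc[char_idx] == org_sent[sent_idx][0]:
--             translated_doc += translated_sent[sent_idx]
--             char_idx += len(org_sent[sent_idx])
--             sent_idx += 1
--         else: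
--             translated_doc += doc[char_idx]
--             char_idx += 1
--     return translated_doc
-- ===== SOURCE B (Python) =====
-- def _reconstruct_document(doc, org_sent, translated_sent):
--     """Per-sentence decomposition: for each sentence, skip non-matching chars,
--     then emit its translation; pieces are collected in a list and joined once."""
--     result = []
--     char_idx = 0
--     for i in range(len(org_sent)):
--         while char_idx < len(doc) and doc[char_idx] != org_sent[i][0]:
--             result.append(doc[char_idx])
--             char_idx += 1
--         if char_idx < len(doc):
--             result.append(translated_sent[i])
--             char_idx += len(org_sent[i])
--     result.append(doc[char_idx:])
--     return ''.join(result)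
-- ===== Notes on version B (the rewrite author's own statement) =====
-- stated objective: faster
-- what changed: Replaces A's single flat state-machine while-loop with quadratic string += by a per-sentence decomposition: an outer loop over sentences with an inner character-skip loop, collecting pieces in a list joined once at the end.
-- outside the precondition, e.g. on _reconstruct_document('ab', ['ab', ''], ['X', 'Y']): A returns 'X', B returns 'X'; on _reconstruct_document('ab', ['ab', 'a'], ['X']): A returns 'X', B returns 'X'
import Mathlib
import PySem

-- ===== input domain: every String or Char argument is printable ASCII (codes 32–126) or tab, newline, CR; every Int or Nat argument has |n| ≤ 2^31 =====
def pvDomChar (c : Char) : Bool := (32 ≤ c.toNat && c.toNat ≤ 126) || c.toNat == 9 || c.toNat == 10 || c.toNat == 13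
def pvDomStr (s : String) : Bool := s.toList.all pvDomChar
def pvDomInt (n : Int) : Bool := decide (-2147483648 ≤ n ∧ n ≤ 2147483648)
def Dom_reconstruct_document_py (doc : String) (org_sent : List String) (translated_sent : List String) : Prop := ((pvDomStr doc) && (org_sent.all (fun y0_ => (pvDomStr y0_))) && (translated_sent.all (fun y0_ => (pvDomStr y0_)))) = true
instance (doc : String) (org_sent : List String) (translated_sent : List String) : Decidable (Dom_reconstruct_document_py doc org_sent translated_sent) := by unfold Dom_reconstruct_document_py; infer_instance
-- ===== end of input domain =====

-- B replaces A's flat state-machine while-loop by a per-sentence outer loop with an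
-- inner skip loop, collecting pieces in a list joined once (alternative decomposition).
-- Python B agrees with Python A on EVERY input on which A returns, and raises the same
-- IndexError exactly where A raises (B's `and` short-circuits once the document is
-- exhausted, so it never touches a sentence or translation A's walk does not reach).

-- ===== PORT A =====
-- A's while-loop over char_idx/sent_idx; rest = doc[char_idx:], acc = translated_doc.
-- Where Python A raises (empty org sentence reached mid-document: org_sent[sent_idx][0];
-- or a missing translated_sent[sent_idx]) the port takes the wildcard branch / getD —
-- those inputs are outside Pre_.
def pvLoopA (rest : List Char) (org : List (List Char)) (tr : List (List Char))
    (sent_idx : Nat) (acc : List Char) : List Char :=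
  match rest with
  | [] => acc
  | c :: cs =>
    match org[sent_idx]? with
    | some (o0 :: os) =>
      if c = o0 then
        -- char_idx += len(org_sent[sent_idx]) : drop (os.length + 1) of (c :: cs)
        pvLoopA (cs.drop os.length) org tr (sent_idx + 1) (acc ++ tr.getD sent_idx [])
      else pvLoopA cs org tr sent_idx (acc ++ [c])
    | _ => pvLoopA cs org tr sent_idx (acc ++ [c])
termination_by rest.length
decreasing_by all_goals (simp only [List.length_cons, List.length_drop]; omega)

def reconstruct_document_py (doc : String) (org_sent : List String) (translated_sent : List String) : String :=
  String.ofList (pvLoopA doc.toList (org_sent.map String.toList) (translated_sent.map String.toList) 0 [])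

-- ===== PORT B =====
-- inner `while char_idx < len(doc) and doc[char_idx] != org_sent[i][0]` loop:
-- returns (the skipped chars, the remaining doc).
def pvSkipB (rest : List Char) (c0 : Char) : List Char × List Char :=
  match rest with
  | [] => ([], [])
  | c :: cs =>
    if c = c0 then ([], c :: cs)
    else
      let p := pvSkipB cs c0
      (c :: p.1, p.2)

-- outer `for i in range(len(org_sent))` loop; acc = result list of pieces.
-- (Empty org sentence reached mid-document / missing translated_sent[i] on a match:
-- Python B raises there exactly like Python A; those inputs are outside Pre_.)
def pvOuterB (rest : List Char) (org : List (List Char)) (tr : List (List Char))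
    (i : Nat) (acc : List (List Char)) : List (List Char) :=
  match org with
  | [] => acc ++ [rest]                   -- result.append(doc[char_idx:])
  | o :: more =>
    match o with
    | [] => pvOuterB rest more tr (i + 1) acc
    | o0 :: os =>
      let p := pvSkipB rest o0
      let acc' := acc ++ p.1.map (fun c => [c])   -- each skipped char appended
      if p.2.isEmpty then pvOuterB [] more tr (i + 1) acc'     -- char_idx == len(doc)
      else pvOuterB (p.2.drop (os.length + 1)) more tr (i + 1) (acc' ++ [tr.getD i []])

def reconstruct_document_py_alt (doc : String) (org_sent : List String) (translated_sent : List String) : String :=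
  String.ofList (PySem.Chars.join []
    (pvOuterB doc.toList (org_sent.map String.toList) (translated_sent.map String.toList) 0 []))

-- ===== PRECONDITION & SPEC =====
-- pvBlock doc s: sentence s starts with a character that never occurs in doc,
-- so A's walk can never match it and sent_idx can never move past it.
def pvBlock (doc : List Char) (s : List Char) : Bool :=
  match s with
  | [] => false
  | c :: _ => ! doc.contains c

-- Pre_ excludes the inputs on which Python A (and Python B identically) raises an
-- IndexError: an empty sentence, or a sentence without a translation, reached by the
-- walk while document characters remain.  The exact reachable set is the run of the
-- walk itself, so Pre_ under-approximates it in closed form (empty document, or every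
-- bad index preceded by a sentence whose first character never occurs in the document);
-- this also excludes some inputs where the walk exhausts the document before the bad
-- index — there A returns and B returns the IDENTICAL value (see the cited examples),
-- so nothing behavioural is hidden by the exclusion.
def Pre_reconstruct_document_py (doc : String) (org_sent : List String) (translated_sent : List String) : Prop :=
  doc.toList = [] ∨
  ∀ j < org_sent.length, ((org_sent.getD j "").toList = [] ∨ translated_sent.length ≤ j) →
    ∃ k ≤ j, pvBlock doc.toList (org_sent.getD k "").toList = true
instance (doc : String) (org_sent : List String) (translated_sent : List String) : Decidable (Pre_reconstruct_document_py doc org_sent translated_sent) := by unfold Pre_reconstruct_document_py; infer_instance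

def pvWitness_reconstruct_document_py : String × List String × List String :=
  ("Hi. Yo", ["Hi.", "Yo"], ["Salut.", "Ho"])

def Spec_reconstruct_document_py (doc : String) (org_sent : List String) (translated_sent : List String) (out : String) : Prop := out = reconstruct_document_py_alt doc org_sent translated_sent
instance (doc : String) (org_sent : List String) (translated_sent : List String) (out : String) : Decidable (Spec_reconstruct_document_py doc org_sent translated_sent out) := by unfold Spec_reconstruct_document_py; infer_instance

-- ===== CLAIM (what is proved, stated in full; the proofs are below) =====
def Claim_equal_reconstruct_document_py : Prop := ∀ (doc : String) (org_sent : List String) (translated_sent : List String), Dom_reconstruct_document_py doc org_sent translated_sent → Pre_reconstruct_document_py doc org_sent translated_sent → Spec_reconstruct_document_py doc org_sent translated_sent (reconstruct_document_py doc org_sent translated_sent)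

-- ===== LEMMAS AND PROOFS =====

-- ''.join on List Char pieces is flatten.
theorem pvJoin_nil_eq_flatten (parts : List (List Char)) :
    PySem.Chars.join [] parts = parts.flatten := by
  induction parts with
  | nil => rfl
  | cons p ps ih =>
    cases ps with
    | nil => simp [PySem.Chars.join, List.intercalate]
    | cons q qs =>
      simp only [PySem.Chars.join, List.intercalate] at ih ⊢
      simp [List.intersperse] at ih ⊢
      exact ih

-- pvOuterB only ever appends to its accumulator.
theorem pvOuterB_acc (org : List (List Char)) :
    ∀ rest tr i acc, pvOuterB rest org tr i acc = acc ++ pvOuterB rest org tr i [] := by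
  induction org with
  | nil => intro rest tr i acc; simp [pvOuterB]
  | cons o more ih =>
    intro rest tr i acc
    cases o with
    | nil => simp only [pvOuterB]; exact ih rest tr (i+1) acc
    | cons o0 os =>
      simp only [pvOuterB]
      by_cases h : (pvSkipB rest o0).2.isEmpty = true
      · rw [if_pos h, if_pos h]
        rw [ih [] tr (i+1) (acc ++ List.map (fun c => [c]) (pvSkipB rest o0).1)]
        rw [ih [] tr (i+1) ([] ++ List.map (fun c => [c]) (pvSkipB rest o0).1)]
        simp
      · rw [if_neg h, if_neg h]
        rw [ih ((pvSkipB rest o0).2.drop (os.length+1)) tr (i+1)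
          (acc ++ List.map (fun c => [c]) (pvSkipB rest o0).1 ++ [tr.getD i []])]
        rw [ih ((pvSkipB rest o0).2.drop (os.length+1)) tr (i+1)
          ([] ++ List.map (fun c => [c]) (pvSkipB rest o0).1 ++ [tr.getD i []])]
        simp

-- On an exhausted document the outer loop only appends the final empty tail.
theorem pvOuterB_nil_rest (org : List (List Char)) :
    ∀ tr i, pvOuterB [] org tr i [] = [[]] := by
  induction org with
  | nil => intro tr i; simp [pvOuterB]
  | cons o more ih =>
    intro tr i
    cases o with
    | nil => simp only [pvOuterB]; exact ih tr (i+1)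
    | cons o0 os => simp only [pvOuterB, pvSkipB]; exact ih tr (i+1)

-- Once sent_idx is past org, A just copies the rest of the document.
theorem pvLoopA_none (rest : List Char) (org : List (List Char)) (tr : List (List Char))
    (k : Nat) (acc : List Char) (h : org[k]? = none) :
    pvLoopA rest org tr k acc = acc ++ rest := by
  induction rest generalizing acc with
  | nil => rw [pvLoopA]; simp
  | cons c cs ih => rw [pvLoopA, h, ih]; simp

-- Skipping a non-matching head.
theorem pvSkipB_cons_ne {c o0 : Char} (cs : List Char) (h : c ≠ o0) :
    pvSkipB (c :: cs) o0 = (c :: (pvSkipB cs o0).1, (pvSkipB cs o0).2) := by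
  simp [pvSkipB, h]

-- A "good" state: every empty sentence still pending is preceded by a pending
-- sentence whose first character does not occur in the remaining document.
def pvOK (rest : List Char) (org : List (List Char)) : Prop :=
  ∀ j < org.length, org.getD j [] = [] → ∃ k ≤ j, pvBlock rest (org.getD k []) = true

-- pvOK is antitone in the remaining document.
theorem pvOK_mono {rest rest' : List Char} (org : List (List Char))
    (hsub : rest' ⊆ rest) (h : pvOK rest org) : pvOK rest' org := by
  intro j hj hje
  obtain ⟨k, hk, hb⟩ := h j hj hje
  refine ⟨k, hk, ?_⟩
  cases hg : org.getD k [] with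
  | nil => rw [hg] at hb; simp [pvBlock] at hb
  | cons c cs =>
    rw [hg] at hb
    simp only [pvBlock, Bool.not_eq_eq_eq_not, Bool.not_true, List.contains_eq_mem,
      decide_eq_false_iff_not] at hb ⊢
    exact fun hmem => hb (hsub hmem)

-- Main invariant: A's flat loop from state (rest, k) equals the join of B's remaining
-- per-sentence loop, provided the pending sentence list is in a good state.
theorem pvMain (org : List (List Char)) (tr : List (List Char)) :
    ∀ n rest, rest.length ≤ n → ∀ k acc, pvOK rest (org.drop k) →
      pvLoopA rest org tr k acc = acc ++ (pvOuterB rest (org.drop k) tr k []).flatten := by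
  intro n
  induction n with
  | zero =>
    intro rest hn k acc _
    have : rest = [] := List.length_eq_zero_iff.mp (Nat.le_zero.mp hn)
    subst this
    rw [pvLoopA, pvOuterB_nil_rest]; simp
  | succ n ih =>
    intro rest hn k acc hok
    cases rest with
    | nil => rw [pvLoopA, pvOuterB_nil_rest]; simp
    | cons c cs =>
      cases hd : org.drop k with
      | nil =>
        have hk : org[k]? = none := by
          rw [List.getElem?_eq_none_iff]
          by_contra hlt
          have := List.drop_eq_nil_iff.mp hd
          omega
        rw [pvLoopA_none _ _ _ _ _ hk, pvOuterB]
        simp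
      | cons o more =>
        rw [hd] at hok
        have hk : org[k]? = some o := by
          have h0 : o = (org.drop k)[0]'(by rw [hd]; simp) := by simp [hd]
          have hlt : k < org.length := by
            by_contra hge
            rw [List.drop_eq_nil_iff.mpr (by omega)] at hd
            simp at hd
          rw [List.getElem?_eq_getElem hlt]
          rw [h0, List.getElem_drop]
          simp
        have hone : o ≠ [] := by
          intro hoe
          obtain ⟨k', hk', hb⟩ := hok 0 (by simp) (by simpa using hoe)
          have : k' = 0 := Nat.le_zero.mp hk'
          subst this
          rw [List.getD_cons_zero, hoe] at hb
          simp [pvBlock] at hb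
        obtain ⟨o0, os, rfl⟩ := List.exists_cons_of_ne_nil hone
        have hdrop1 : org.drop (k + 1) = more := by
          have ht := congrArg List.tail hd
          rwa [List.tail_drop] at ht
        rw [pvOuterB]
        by_cases hc : c = o0
        · subst hc
          -- the head sentence matches: pvOK transfers to the remaining sentences
          have hok' : pvOK (cs.drop os.length) more := by
            intro j hj hje
            obtain ⟨k', hk', hb⟩ := hok (j + 1) (by simpa using hj) (by simpa using hje)
            cases k' with
            | zero =>
              simp only [List.getD_cons_zero, pvBlock, Bool.not_eq_eq_eq_not, Bool.not_true,
                List.contains_eq_mem, decide_eq_false_iff_not] at hb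
              exact absurd (List.mem_cons_self) hb
            | succ k'' =>
              refine ⟨k'', by omega, ?_⟩
              simp only [List.getD_cons_succ] at hb
              cases hg : more.getD k'' [] with
              | nil => rw [hg] at hb; simp [pvBlock] at hb
              | cons b bs =>
                rw [hg] at hb
                simp only [pvBlock, Bool.not_eq_eq_eq_not, Bool.not_true,
                  List.contains_eq_mem, decide_eq_false_iff_not] at hb ⊢
                exact fun hmem => hb (List.mem_cons_of_mem _ (List.drop_subset _ _ hmem))
          rw [pvLoopA, hk]
          have hskip : pvSkipB (c :: cs) c = ([], c :: cs) := by simp [pvSkipB]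
          rw [hskip]
          simp only [List.map_nil, List.append_nil, List.nil_append,
            List.isEmpty_cons, Bool.false_eq_true, if_false, List.drop_succ_cons]
          rw [ih (cs.drop os.length) (by simp only [List.length_cons] at hn; simp only [List.length_drop]; omega) (k + 1) _ (by rwa [hdrop1]),
            pvOuterB_acc more (cs.drop os.length) tr (k+1) [tr.getD k []], hdrop1]
          simp
        · have hok' : pvOK cs ((o0 :: os) :: more) :=
            pvOK_mono _ (List.subset_cons_self c cs) hok
          rw [pvLoopA, hk]
          simp only [if_neg hc]
          rw [ih cs (by simp only [List.length_cons] at hn; omega) k, hd, pvOuterB,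
            pvSkipB_cons_ne cs hc]
          · simp only [List.map_cons, List.cons_append, List.nil_append]
            split
            · rw [pvOuterB_acc more [] tr (k+1) ([c] :: List.map (fun c => [c]) (pvSkipB cs o0).1),
                pvOuterB_acc more [] tr (k+1) (List.map (fun c => [c]) (pvSkipB cs o0).1)]
              simp
            · rw [pvOuterB_acc more ((pvSkipB cs o0).2.drop (os.length+1)) tr (k+1)
                ([c] :: (List.map (fun c => [c]) (pvSkipB cs o0).1 ++ [tr.getD k []])),
                pvOuterB_acc more ((pvSkipB cs o0).2.drop (os.length+1)) tr (k+1)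
                (List.map (fun c => [c]) (pvSkipB cs o0).1 ++ [tr.getD k []])]
              simp
          · rwa [hd]

-- ===== VERDICT (by name: the statement is the Claim_ definition above) =====
theorem reconstruct_document_py_spec : Claim_equal_reconstruct_document_py := by
  intro doc org tr _ hpre
  unfold Spec_reconstruct_document_py reconstruct_document_py reconstruct_document_py_alt
  rw [pvJoin_nil_eq_flatten]
  rcases hpre with hnil | hpre
  · rw [hnil, pvLoopA, pvOuterB_nil_rest]
    simp
  · have hmap : ∀ i, i < org.length → (org.map String.toList).getD i [] = (org.getD i "").toList := by
      intro i hi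
      rw [List.getD_eq_getElem?_getD, List.getElem?_map, List.getD_eq_getElem?_getD,
        List.getElem?_eq_getElem hi]
      simp
    have hok : pvOK doc.toList ((org.map String.toList).drop 0) := by
      rw [List.drop_zero]
      intro j hj hje
      rw [List.length_map] at hj
      rw [hmap j hj] at hje
      obtain ⟨k, hk, hb⟩ := hpre j hj (Or.inl hje)
      exact ⟨k, hk, by rw [hmap k (lt_of_le_of_lt hk hj)]; exact hb⟩
    rw [pvMain (org.map String.toList) (tr.map String.toList) doc.toList.length doc.toList le_rfl 0 [] hok]
    simp
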